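-- pv_equiv track=rewrite | github.com/lucas-lankry/Options-Pricing-Calculator | livre2.py | prod_odd
-- ===== SOURCE A (Python) =====
-- def prod_odd(data):
--     Value = False
--     total = 0
--     for i in data:
--         if i % 2 != 0 :
--             total += 1
--         elif total >= 2:
--             Value = True
--     return Value
-- ===== SOURCE B (Python) =====
-- def _after_odd(ps):
--     """Tail of ps strictly after its first nonzero entry, or None if none."""
--     for j, p in enumerate(ps):
--         if p != 0:
--             return ps[j + 1:]
--     return None
--
-- def prod_odd(data):
--     parity = [i % 2 for i in data]
--     rest = _after_odd(parity)
--     if rest is not None: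
--         rest = _after_odd(rest)
--     if rest is None:
--         return False
--     return 0 in rest
-- ===== Notes on version B (the rewrite author's own statement) =====
-- stated objective: alternative
-- what changed: B materializes the parity list, locates the tail after the second odd by two locate-and-slice passes, and answers with a membership test, instead of A's single pass accumulating a counter and a flag.
import Mathlib
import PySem

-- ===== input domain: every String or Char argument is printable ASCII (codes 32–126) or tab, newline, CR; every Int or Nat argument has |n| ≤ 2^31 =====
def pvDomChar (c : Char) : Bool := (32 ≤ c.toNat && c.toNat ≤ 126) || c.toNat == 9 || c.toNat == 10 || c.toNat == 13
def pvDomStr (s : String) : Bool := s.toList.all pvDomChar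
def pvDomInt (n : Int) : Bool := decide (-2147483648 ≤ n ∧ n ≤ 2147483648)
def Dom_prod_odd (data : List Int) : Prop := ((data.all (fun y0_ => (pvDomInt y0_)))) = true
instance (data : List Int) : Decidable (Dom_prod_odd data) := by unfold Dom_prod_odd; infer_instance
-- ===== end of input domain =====

-- B replaces A's single accumulating pass (odd counter + flag) by: build the parity list, drop past the second odd by two locate-and-slice steps, then a membership test for an even; same O(n) cost, different decomposition.


-- ===== PORT A =====
def prod_odd (data : List Int) : Bool :=
  (data.foldl
    (fun (s : Bool × Int) i =>
      if PySem.Int.mod i 2 ≠ 0 then (s.1, s.2 + 1)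
      else if s.2 ≥ 2 then (true, s.2)
      else s)
    (false, 0)).1

-- ===== PORT B =====
-- tail of ps strictly after its first nonzero entry, or none (port of _after_odd's loop)
def afterOdd : List Int → Option (List Int)
  | [] => none
  | p :: r => if p ≠ 0 then some r else afterOdd r

def prod_odd_alt (data : List Int) : Bool :=
  let parity := data.map (fun i => PySem.Int.mod i 2)
  let rest :=
    match afterOdd parity with
    | none => none
    | some r => afterOdd r
  match rest with
  | none => false
  | some r => r.contains 0

-- ===== PRECONDITION & SPEC =====
def Spec_prod_odd (data : List Int) (out : Bool) : Prop := out = prod_odd_alt data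
instance (data : List Int) (out : Bool) : Decidable (Spec_prod_odd data out) := by unfold Spec_prod_odd; infer_instance

-- ===== CLAIM (what is proved, stated in full; the proofs are below) =====
def Claim_equal_prod_odd : Prop := ∀ (data : List Int), Dom_prod_odd data → Spec_prod_odd data (prod_odd data)

-- ===== LEMMAS AND PROOFS =====

-- ===== VERDICT (by name: the statement is the Claim_ definition above) =====
-- g l t: what A's loop returns when started with flag false and counter t
def g : List Int → Int → Bool
  | [], _ => false
  | i :: r, t => if PySem.Int.mod i 2 ≠ 0 then g r (t + 1) else (decide (t ≥ 2) || g r t)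

theorem foldA (l : List Int) (v : Bool) (t : Int) :
    l.foldl (fun (s : Bool × Int) i =>
      if PySem.Int.mod i 2 ≠ 0 then (s.1, s.2 + 1)
      else if s.2 ≥ 2 then (true, s.2) else s) (v, t)
    = (v || g l t, t + ((l.filter (fun i => PySem.Int.mod i 2 ≠ 0)).length : Int)) := by
  induction l generalizing v t with
  | nil => simp [g]
  | cons i r ih =>
    simp at ih
    rcases Int.emod_two_eq i with h | h
    · by_cases h2 : (2:Int) ≤ t <;>
        cases v <;> simp [List.foldl, h, h2, g, ih.1, ih.2]
    · cases v <;> simp [List.foldl, h, g, ih.1, ih.2] <;> omega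

theorem g_two (l : List Int) (t : Int) (ht : t ≥ 2) :
    g l t = (l.map (fun i => PySem.Int.mod i 2)).contains 0 := by
  induction l generalizing t with
  | nil => simp [g]
  | cons i r ih =>
    rcases Int.emod_two_eq i with h | h
    · simp [g, h, ht]
    · simp [g, h, ih (t + 1) (by omega)]

theorem g_one (l : List Int) :
    g l 1 = (match afterOdd (l.map (fun i => PySem.Int.mod i 2)) with
             | none => false
             | some r => r.contains 0) := by
  induction l with
  | nil => simp [g, afterOdd]
  | cons i r ih =>
    rcases Int.emod_two_eq i with h | h
    · simp [g, h, afterOdd, ih]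
    · simp [g, h, afterOdd, g_two r 2 (by omega)]

theorem g_zero (l : List Int) : g l 0 = prod_odd_alt l := by
  induction l with
  | nil => simp [g, prod_odd_alt, afterOdd]
  | cons i r ih =>
    rcases Int.emod_two_eq i with h | h
    · simpa [g, h, prod_odd_alt, afterOdd] using ih
    · simp [g, h, prod_odd_alt, afterOdd, g_one r]

theorem prod_odd_spec : Claim_equal_prod_odd := by
  intro data _
  show prod_odd data = prod_odd_alt data
  unfold prod_odd
  rw [foldA, ← g_zero]
  simp
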